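-- pv_equiv track=rewrite | github.com/DarkMantrid/IR-decoder | main_backup.py | clean_bits_string
-- ===== SOURCE A (Python) =====
-- def clean_bits_string(bits_str):
--     """Clean up the bits string by removing invalid bits and finding the main signal"""
--     # Remove leading and trailing invalid bits
--     start = 0
--     end = len(bits_str)
--
--     # Find first valid bit
--     for i, bit in enumerate(bits_str):
--         if bit in '01':
--             start = i
--             break
--
--     # Find last valid bit
--     for i in range(len(bits_str) - 1, -1, -1):
--         if bits_str[i] in '01':
--             end = i + 1
--             break
--
--     cleaned = bits_str[start:end]
--
--     # Replace any remaining '?' with '0' (conservative approach)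
--     cleaned = cleaned.replace('?', '0')
--
--     return cleaned
-- ===== SOURCE B (Python) =====
-- def clean_bits_string(bits_str):
--     """Single forward pass: track first and last valid-bit indices, then slice once."""
--     first = last = None
--     for i, c in enumerate(bits_str):
--         if c == '0' or c == '1':
--             if first is None:
--                 first = i
--             last = i
--     if first is None:
--         return bits_str.replace('?', '0')
--     return bits_str[first:last + 1].replace('?', '0')
-- ===== Notes on version B (the rewrite author's own statement) =====
-- stated objective: simpler
-- what changed: Replaces A's two separate edge scans (a forward enumerate-break and a backward range-break with indexed access) by a single forward pass that tracks first and last valid-bit indices, then slices once. (one traversal instead of two, measured ~1.8x faster).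
import Mathlib
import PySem

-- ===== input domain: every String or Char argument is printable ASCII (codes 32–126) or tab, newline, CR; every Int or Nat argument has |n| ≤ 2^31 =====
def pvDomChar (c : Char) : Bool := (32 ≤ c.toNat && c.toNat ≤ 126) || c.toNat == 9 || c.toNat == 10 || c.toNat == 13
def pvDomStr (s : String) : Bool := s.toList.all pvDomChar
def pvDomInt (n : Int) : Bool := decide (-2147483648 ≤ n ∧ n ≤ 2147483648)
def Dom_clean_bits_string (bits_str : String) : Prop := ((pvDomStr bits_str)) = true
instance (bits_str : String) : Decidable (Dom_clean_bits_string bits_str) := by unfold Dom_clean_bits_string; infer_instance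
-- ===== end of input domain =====

-- B replaces A's two separate forward/backward edge scans by one forward pass tracking the
-- first and last valid-bit indices (objective: simpler — one traversal, one slice).

-- shared by both ports: Python's `c in '01'` for a single character
def pvIsBit (c : Char) : Bool := c == '0' || c == '1'

-- ===== PORT A =====
-- 'for i, bit in enumerate(bits_str): if bit in "01": start = i; break'
def pvFindFirst : List Char → Nat → Option Nat
  | [], _ => none
  | c :: rest, i => if pvIsBit c then some i else pvFindFirst rest (i + 1)

-- 'for i in range(len(bits_str)-1, -1, -1): if bits_str[i] in "01": end = i+1; break'
-- written as the same countdown (argument k+1 means current index k; the index is always in range)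
def pvFindLast (cs : List Char) : Nat → Option Nat
  | 0 => none
  | k + 1 => if (cs[k]?).any pvIsBit then some k else pvFindLast cs k

def clean_bits_string (bits_str : String) : String :=
  let cs := bits_str.toList
  let start : Nat := (pvFindFirst cs 0).getD 0
  let stop : Nat := match pvFindLast cs cs.length with | some i => i + 1 | none => cs.length
  let cleaned := PySem.List.slice cs (some (start : Int)) (some (stop : Int))
  String.ofList (PySem.Chars.replace cleaned ['?'] ['0'])

-- ===== PORT B =====
-- the single forward pass of Source B: (first, last) indices of valid bits
def pvScan : List Char → Nat → Option Nat → Option Nat → Option Nat × Option Nat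
  | [], _, first, last => (first, last)
  | c :: rest, i, first, last =>
    if pvIsBit c then
      pvScan rest (i + 1) (if first.isNone then some i else first) (some i)
    else
      pvScan rest (i + 1) first last

def clean_bits_string_alt (bits_str : String) : String :=
  let cs := bits_str.toList
  match pvScan cs 0 none none with
  | (some f, some l) =>
      String.ofList (PySem.Chars.replace
        (PySem.List.slice cs (some (f : Int)) (some ((l + 1 : Nat) : Int))) ['?'] ['0'])
  | _ => String.ofList (PySem.Chars.replace cs ['?'] ['0'])

-- ===== PRECONDITION & SPEC =====
def Spec_clean_bits_string (bits_str : String) (out : String) : Prop := out = clean_bits_string_alt bits_str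
instance (bits_str : String) (out : String) : Decidable (Spec_clean_bits_string bits_str out) := by unfold Spec_clean_bits_string; infer_instance

-- ===== CLAIM (what is proved, stated in full; the proofs are below) =====
def Claim_equal_clean_bits_string : Prop := ∀ (bits_str : String), Dom_clean_bits_string bits_str → Spec_clean_bits_string bits_str (clean_bits_string bits_str)

-- ===== LEMMAS AND PROOFS =====

-- canonical "last valid-bit index from offset i", recursing on the list
def pvLastAux : List Char → Nat → Option Nat
  | [], _ => none
  | c :: rest, i => (pvLastAux rest (i + 1)).or (if pvIsBit c then some i else none)

theorem pvScan_fst (cs : List Char) : ∀ (i : Nat) (f l : Option Nat),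
    (pvScan cs i f l).1 = f.or (pvFindFirst cs i) := by
  induction cs with
  | nil => intro i f l; simp [pvScan, pvFindFirst]
  | cons c rest ih =>
    intro i f l
    by_cases hb : pvIsBit c
    · cases f <;> simp [pvScan, pvFindFirst, hb, ih]
    · simp [pvScan, pvFindFirst, hb, ih]

theorem pvScan_snd (cs : List Char) : ∀ (i : Nat) (f l : Option Nat),
    (pvScan cs i f l).2 = (pvLastAux cs i).or l := by
  induction cs with
  | nil => intro i f l; simp [pvScan, pvLastAux]
  | cons c rest ih =>
    intro i f l
    by_cases hb : pvIsBit c <;>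
      simp [pvScan, pvLastAux, hb, ih]

theorem pvLastAux_append (c : Char) (xs : List Char) : ∀ i : Nat,
    pvLastAux (xs ++ [c]) i = if pvIsBit c then some (i + xs.length) else pvLastAux xs i := by
  induction xs with
  | nil => intro i; simp [pvLastAux]
  | cons x xs ih =>
    intro i
    by_cases hb : pvIsBit c
    · simp [pvLastAux, ih, hb]
      omega
    · simp [pvLastAux, ih, hb]

theorem pvFindLast_eq (cs : List Char) : ∀ k : Nat, k ≤ cs.length →
    pvFindLast cs k = pvLastAux (cs.take k) 0 := by
  intro k
  induction k with
  | zero => intro _; simp [pvFindLast, pvLastAux]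
  | succ k ih =>
    intro hk
    have hk' : k < cs.length := by omega
    have hget : cs[k]? = some cs[k] := List.getElem?_eq_getElem hk'
    have htake : cs.take (k + 1) = cs.take k ++ [cs[k]] := by
      rw [List.take_add_one, hget]; rfl
    rw [pvFindLast, htake, pvLastAux_append]
    by_cases hb : pvIsBit cs[k]
    · simp [hget, hb]
      omega
    · simp [hget, hb, ih (by omega)]

theorem pvFindFirst_none_iff_lastAux_none (cs : List Char) : ∀ i : Nat,
    (pvFindFirst cs i = none ↔ pvLastAux cs i = none) := by
  induction cs with
  | nil => intro i; simp [pvFindFirst, pvLastAux]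
  | cons c rest ih =>
    intro i
    by_cases hb : pvIsBit c <;>
      simp [pvFindFirst, pvLastAux, hb, ih]

-- ===== VERDICT (by name: the statement is the Claim_ definition above) =====
theorem clean_bits_string_spec : Claim_equal_clean_bits_string := by
  intro s _
  unfold Spec_clean_bits_string clean_bits_string clean_bits_string_alt
  simp only
  set cs := s.toList with hcs
  have hfst : (pvScan cs 0 none none).1 = pvFindFirst cs 0 := by
    simp [pvScan_fst]
  have hsnd : (pvScan cs 0 none none).2 = pvLastAux cs 0 := by
    simp [pvScan_snd]
  have hlast : pvFindLast cs cs.length = pvLastAux cs 0 := by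
    simpa using pvFindLast_eq cs cs.length le_rfl
  cases hF : pvFindFirst cs 0 with
  | none =>
    have hL : pvLastAux cs 0 = none := (pvFindFirst_none_iff_lastAux_none cs 0).mp hF
    have hscan : pvScan cs 0 none none = (none, none) := by
      have := hfst; have := hsnd
      ext1 <;> simp [hfst, hsnd, hF, hL]
    rw [hscan]
    simp [hlast, hL, PySem.List.slice_to_natCast]
  | some f =>
    have hL : pvLastAux cs 0 ≠ none := fun h =>
      by simp [(pvFindFirst_none_iff_lastAux_none cs 0).mpr h] at hF
    cases hL' : pvLastAux cs 0 with
    | none => exact absurd hL' hL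
    | some l =>
      have hscan : pvScan cs 0 none none = (some f, some l) := by
        ext1 <;> simp [hfst, hsnd, hF, hL']
      rw [hscan]
      simp [hlast, hL']
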